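-- pv_equiv track=rewrite | github.com/Alpha-778/CodeForces-solution-in-Python | 2130F Permutation Blackhole.py | calculate_total_permutation_variants
-- ===== SOURCE A (Python) =====
-- constant_modulo = 998244353
--
-- def generate_combinatorial_table(limit_value, modulus_value):
--     two_dimensional_array = [[0 for _ in range(limit_value + 1)] for _ in range(limit_value + 1)]
--     for outer_index in range(limit_value + 1):
--         two_dimensional_array[outer_index][0] = 1
--         for inner_index in range(1, outer_index + 1):
--             two_dimensional_array[outer_index][inner_index] = (two_dimensional_array[outer_index - 1][inner_index - 1] + two_dimensional_array[outer_index - 1][inner_index]) % modulus_value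
--     return two_dimensional_array
--
-- def calculate_total_permutation_variants(input_sequence):
--     total_elements = len(input_sequence) - 1
--     storage_matrix = [[0 for _ in range(total_elements + 2)] for _ in range(total_elements + 2)]
--     precomputed_combinations = generate_combinatorial_table(total_elements, constant_modulo)
--     for initial_index in range(1, total_elements + 2):
--         storage_matrix[initial_index][initial_index - 1] = 1
--     for current_interval_size in range(1, total_elements + 1):
--         for current_start in range(1, total_elements - current_interval_size + 2):
--             current_end = current_start + current_interval_size - 1
--             intermediate_result = 0
--             for proposed_middle in range(current_start, current_end + 1):
--                 computed_requirement = 0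
--                 if proposed_middle > current_start:
--                     computed_requirement += 1
--                 if proposed_middle < current_end:
--                     computed_requirement += 1
--                 if input_sequence[proposed_middle] != -1 and input_sequence[proposed_middle] != computed_requirement:
--                     continue
--                 total_left_count = proposed_middle - current_start
--                 total_right_count = current_end - proposed_middle
--                 valid_left_configurations = storage_matrix[current_start][proposed_middle - 1]
--                 valid_right_configurations = storage_matrix[proposed_middle + 1][current_end]
--                 number_of_selections = precomputed_combinations[total_left_count + total_right_count][total_left_count]
--                 current_contribution = number_of_selections * valid_left_configurations % constant_modulo
--                 current_contribution = current_contribution * valid_right_configurations % constant_modulo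
--                 intermediate_result = (intermediate_result + current_contribution) % constant_modulo
--             storage_matrix[current_start][current_end] = intermediate_result
--     return storage_matrix[1][total_elements]
-- ===== SOURCE B (Python) =====
-- constant_modulo = 998244353
--
-- def generate_combinatorial_table(limit_value, modulus_value):
--     # same Pascal-triangle table as A builds
--     two_dimensional_array = [[0 for _ in range(limit_value + 1)] for _ in range(limit_value + 1)]
--     for outer_index in range(limit_value + 1):
--         two_dimensional_array[outer_index][0] = 1
--         for inner_index in range(1, outer_index + 1):
--             two_dimensional_array[outer_index][inner_index] = (two_dimensional_array[outer_index - 1][inner_index - 1] + two_dimensional_array[outer_index - 1][inner_index]) % modulus_value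
--     return two_dimensional_array
--
-- def calculate_total_permutation_variants(input_sequence):
--     total_elements = len(input_sequence) - 1
--     comb = generate_combinatorial_table(total_elements, constant_modulo)
--     memo = {}
--
--     def solve(start, end):
--         if start > end:
--             return 1
--         key = (start, end)
--         if key in memo:
--             return memo[key]
--         total = 0
--         for mid in range(start, end + 1):
--             requirement = (1 if mid > start else 0) + (1 if mid < end else 0)
--             value = input_sequence[mid]
--             if value == -1 or value == requirement:
--                 left = mid - start
--                 right = end - mid
--                 contribution = comb[left + right][left] * solve(start, mid - 1) % constant_modulo
--                 contribution = contribution * solve(mid + 1, end) % constant_modulo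
--                 total = (total + contribution) % constant_modulo
--         memo[key] = total
--         return total
--
--     return solve(1, total_elements)
-- ===== Notes on version B (the rewrite author's own statement) =====
-- stated objective: faster
-- what changed: Replaces A's bottom-up interval-DP tabulation (size/start loops filling the whole 2-D matrix) by top-down memoized recursion solve(start, end) with a dict memo, which only evaluates sub-intervals actually reachable from (1, n); the binomial table is precomputed the same way.
import Mathlib
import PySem

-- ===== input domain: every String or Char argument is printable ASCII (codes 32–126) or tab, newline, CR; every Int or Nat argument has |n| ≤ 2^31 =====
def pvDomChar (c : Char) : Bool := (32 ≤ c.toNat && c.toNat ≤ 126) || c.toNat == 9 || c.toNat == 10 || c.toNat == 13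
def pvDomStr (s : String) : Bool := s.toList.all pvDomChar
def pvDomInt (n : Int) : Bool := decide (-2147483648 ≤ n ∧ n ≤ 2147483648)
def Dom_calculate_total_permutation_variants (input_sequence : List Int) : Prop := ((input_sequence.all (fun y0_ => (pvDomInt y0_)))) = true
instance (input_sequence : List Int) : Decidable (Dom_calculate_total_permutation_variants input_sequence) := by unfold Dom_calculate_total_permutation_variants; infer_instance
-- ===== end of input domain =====

-- B replaces A's bottom-up size/start interval-DP tabulation by top-down memoized recursion over
-- sub-intervals, computing only sub-intervals reachable from (1, n) (measured faster); return value only.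

-- ===== PORT A =====
def constant_modulo : Int := 998244353

-- 2-D list read/write with Python list[int][int] access (all indices used inside Pre_ are
-- non-negative and in range, where .toNat indexing is exact Python behaviour)
def pvMatGet (m : List (List Int)) (i j : Int) : Int := (m.getD i.toNat []).getD j.toNat 0
def pvMatSet (m : List (List Int)) (i j : Int) (v : Int) : List (List Int) :=
  m.set i.toNat ((m.getD i.toNat []).set j.toNat v)

-- generate_combinatorial_table: identical helper in Source A and Source B, shared by both ports
def generate_combinatorial_table (limit_value modulus_value : Int) : List (List Int) :=
  let t0 : List (List Int) :=
    List.replicate (limit_value + 1).toNat (List.replicate (limit_value + 1).toNat 0)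
  (PySem.List.pyRange 0 (limit_value + 1) 1).foldl (fun t outer_index =>
    let t := pvMatSet t outer_index 0 1
    (PySem.List.pyRange 1 (outer_index + 1) 1).foldl (fun t inner_index =>
      pvMatSet t outer_index inner_index
        (PySem.Int.mod (pvMatGet t (outer_index - 1) (inner_index - 1)
          + pvMatGet t (outer_index - 1) inner_index) modulus_value)) t) t0

def calculate_total_permutation_variants (input_sequence : List Int) : Int :=
  let total_elements : Int := (input_sequence.length : Int) - 1
  let storage0 : List (List Int) :=
    List.replicate (total_elements + 2).toNat (List.replicate (total_elements + 2).toNat 0)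
  let precomputed_combinations := generate_combinatorial_table total_elements constant_modulo
  let storage1 := (PySem.List.pyRange 1 (total_elements + 2) 1).foldl
    (fun m initial_index => pvMatSet m initial_index (initial_index - 1) 1) storage0
  let storage2 := (PySem.List.pyRange 1 (total_elements + 1) 1).foldl (fun m current_interval_size =>
    (PySem.List.pyRange 1 (total_elements - current_interval_size + 2) 1).foldl (fun m current_start =>
      let current_end := current_start + current_interval_size - 1
      let intermediate_result := (PySem.List.pyRange current_start (current_end + 1) 1).foldl
        (fun acc proposed_middle =>
          let computed_requirement : Int :=
            (if proposed_middle > current_start then 1 else 0)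
            + (if proposed_middle < current_end then 1 else 0)
          let v := (PySem.List.pyGet? input_sequence proposed_middle).getD 0
          if v ≠ -1 ∧ v ≠ computed_requirement then acc
          else
            let total_left_count := proposed_middle - current_start
            let total_right_count := current_end - proposed_middle
            let valid_left_configurations := pvMatGet m current_start (proposed_middle - 1)
            let valid_right_configurations := pvMatGet m (proposed_middle + 1) current_end
            let number_of_selections :=
              pvMatGet precomputed_combinations (total_left_count + total_right_count) total_left_count
            PySem.Int.mod (acc + PySem.Int.mod (PySem.Int.mod
              (number_of_selections * valid_left_configurations) constant_modulo
              * valid_right_configurations) constant_modulo) constant_modulo) 0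
      pvMatSet m current_start current_end intermediate_result) m) storage1
  pvMatGet storage2 1 total_elements

-- ===== PORT B =====
-- top-down: solve(start, end) with a memo dict; the Nat argument is a totality fuel only
-- (always sufficient at the call site; Source B's recursion needs none)
def pvSolveB (seq : List Int) (C : List (List Int)) :
    Nat → Int → Int → PySem.Dict (Int × Int) Int → Int × PySem.Dict (Int × Int) Int
  | 0, _, _, memo => (0, memo)
  | f + 1, s, e, memo =>
    if s > e then (1, memo)
    else
      match memo.get? (s, e) with
      | some v => (v, memo)
      | none =>
        let st := (PySem.List.pyRange s (e + 1) 1).foldl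
          (fun (p : Int × PySem.Dict (Int × Int) Int) mid =>
            let requirement : Int := (if mid > s then 1 else 0) + (if mid < e then 1 else 0)
            let v := (PySem.List.pyGet? seq mid).getD 0
            if v = -1 ∨ v = requirement then
              let q1 := pvSolveB seq C f s (mid - 1) p.2
              let q2 := pvSolveB seq C f (mid + 1) e q1.2
              let contribution := PySem.Int.mod (PySem.Int.mod
                (pvMatGet C ((mid - s) + (e - mid)) (mid - s) * q1.1) constant_modulo
                * q2.1) constant_modulo
              (PySem.Int.mod (p.1 + contribution) constant_modulo, q2.2)
            else p) (0, memo)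
        (st.1, st.2.insert (s, e) st.1)

def calculate_total_permutation_variants_alt (input_sequence : List Int) : Int :=
  let total_elements : Int := (input_sequence.length : Int) - 1
  let comb := generate_combinatorial_table total_elements constant_modulo
  (pvSolveB input_sequence comb (input_sequence.length + 1) 1 total_elements PySem.Dict.empty).1

-- ===== PRECONDITION & SPEC =====
-- Pre_ excludes only the empty list, on which A raises IndexError (storage_matrix[1][-1] on a 1×1 matrix).
def Pre_calculate_total_permutation_variants (input_sequence : List Int) : Prop :=
  input_sequence ≠ []
instance (input_sequence : List Int) : Decidable (Pre_calculate_total_permutation_variants input_sequence) := by unfold Pre_calculate_total_permutation_variants; infer_instance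

def pvWitness_calculate_total_permutation_variants : List Int := [-1, 1]

def Spec_calculate_total_permutation_variants (input_sequence : List Int) (out : Int) : Prop := out = calculate_total_permutation_variants_alt input_sequence
instance (input_sequence : List Int) (out : Int) : Decidable (Spec_calculate_total_permutation_variants input_sequence out) := by unfold Spec_calculate_total_permutation_variants; infer_instance

-- ===== CLAIM (what is proved, stated in full; the proofs are below) =====
def Claim_equal_calculate_total_permutation_variants : Prop := ∀ (input_sequence : List Int), Dom_calculate_total_permutation_variants input_sequence → Pre_calculate_total_permutation_variants input_sequence → Spec_calculate_total_permutation_variants input_sequence (calculate_total_permutation_variants input_sequence)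

-- ===== LEMMAS AND PROOFS =====

-- interval size, the recursion measure of the pure specification
def pvSz (s e : Int) : Nat := (e + 1 - s).toNat

-- pure (memo-free) fueled interval recursion: the common mathematical content of both programs
def pvSolveP (seq : List Int) (C : List (List Int)) : Nat → Int → Int → Int
  | 0, _, _ => 0
  | f + 1, s, e =>
    if s > e then 1
    else (PySem.List.pyRange s (e + 1) 1).foldl (fun acc mid =>
      if (PySem.List.pyGet? seq mid).getD 0 = -1 ∨
          (PySem.List.pyGet? seq mid).getD 0
            = ((if mid > s then 1 else 0) + (if mid < e then 1 else 0)) then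
        PySem.Int.mod (acc + PySem.Int.mod (PySem.Int.mod
          (pvMatGet C ((mid - s) + (e - mid)) (mid - s) * pvSolveP seq C f s (mid - 1))
            constant_modulo
          * pvSolveP seq C f (mid + 1) e) constant_modulo) constant_modulo
      else acc) 0

def pvSol (seq : List Int) (C : List (List Int)) (s e : Int) : Int :=
  pvSolveP seq C (pvSz s e + 1) s e

-- the canonical loop step, with the two sub-interval results given by pvSol
def pvStep (seq : List Int) (C : List (List Int)) (s e : Int) (acc mid : Int) : Int :=
  if (PySem.List.pyGet? seq mid).getD 0 = -1 ∨
      (PySem.List.pyGet? seq mid).getD 0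
        = ((if mid > s then 1 else 0) + (if mid < e then 1 else 0)) then
    PySem.Int.mod (acc + PySem.Int.mod (PySem.Int.mod
      (pvMatGet C ((mid - s) + (e - mid)) (mid - s) * pvSol seq C s (mid - 1)) constant_modulo
      * pvSol seq C (mid + 1) e) constant_modulo) constant_modulo
  else acc

theorem pvSolveP_eq_sol (seq : List Int) (C : List (List Int)) :
    ∀ (f : Nat) (s e : Int), pvSz s e < f → pvSolveP seq C f s e = pvSol seq C s e := by
  intro f
  induction f using Nat.strong_induction_on with
  | _ f ih =>
    intro s e hf
    rcases f with _ | k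
    · exact absurd hf (by omega)
    · unfold pvSol
      by_cases hse : s > e
      · simp only [pvSolveP]
        rw [if_pos hse, if_pos hse]
      · simp only [pvSolveP]
        rw [if_neg hse, if_neg hse]
        refine PySem.List.foldl_congr_mem _ _ _ _ ?_
        intro acc mid hmem
        rw [PySem.List.mem_pyRange_one] at hmem
        have e1 := ih k (by omega) s (mid - 1) (by unfold pvSz at hf ⊢; omega)
        have e2 := ih k (by omega) (mid + 1) e (by unfold pvSz at hf ⊢; omega)
        have e3 := ih (pvSz s e) hf s (mid - 1) (by unfold pvSz; omega)
        have e4 := ih (pvSz s e) hf (mid + 1) e (by unfold pvSz; omega)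
        simp only [e1, e2, e3, e4]

theorem pvSol_eq (seq : List Int) (C : List (List Int)) (s e : Int) :
    pvSol seq C s e =
      if s > e then 1
      else (PySem.List.pyRange s (e + 1) 1).foldl (pvStep seq C s e) 0 := by
  unfold pvSol
  by_cases hse : s > e
  · simp only [pvSolveP]
    rw [if_pos hse, if_pos hse]
  · simp only [pvSolveP]
    rw [if_neg hse, if_neg hse]
    refine PySem.List.foldl_congr_mem _ _ _ _ ?_
    intro acc mid hmem
    rw [PySem.List.mem_pyRange_one] at hmem
    have e3 := pvSolveP_eq_sol seq C (pvSz s e) s (mid - 1) (by unfold pvSz; omega)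
    have e4 := pvSolveP_eq_sol seq C (pvSz s e) (mid + 1) e (by unfold pvSz; omega)
    simp only [pvStep, e3, e4]

theorem pvSol_base (seq : List Int) (C : List (List Int)) (s e : Int) (h : e < s) :
    pvSol seq C s e = 1 := by
  rw [pvSol_eq, if_pos h]

-- generic invariant-threading over foldl on range(a, b)
theorem pvFoldInv {α : Type} (f : α → Int → α) (Q : Int → α → Prop) (b : Int) :
    ∀ (k : Nat) (a : Int) (x : α), (b - a).toNat = k → a ≤ b → Q a x →
      (∀ i y, a ≤ i → i < b → Q i y → Q (i + 1) (f y i)) →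
      Q b ((PySem.List.pyRange a b 1).foldl f x) := by
  intro k
  induction k with
  | zero =>
    intro a x hk hab h0 _
    have hab' : a = b := by omega
    subst hab'
    rw [PySem.List.pyRange_one_eq_nil le_rfl]
    exact h0
  | succ k ih =>
    intro a x hk hab h0 hstep
    have hlt : a < b := by omega
    rw [PySem.List.pyRange_one_cons hlt, List.foldl_cons]
    exact ih (a + 1) (f x a) (by omega) (by omega) (hstep a x le_rfl hlt h0)
      (fun i y h1 h2 hq => hstep i y (by omega) h2 hq)

-- getD / set facts used for the 2-D list
theorem pvGetD_set_self {α : Type} (d : α) (l : List α) (i : Nat) (r : α) (hi : i < l.length) :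
    (l.set i r).getD i d = r := by
  simp [List.getD_eq_getElem?_getD, hi]

theorem pvGetD_set_ne {α : Type} (d : α) (l : List α) (i i' : Nat) (r : α) (h : i ≠ i') :
    (l.set i r).getD i' d = l.getD i' d := by
  simp [List.getD_eq_getElem?_getD, List.getElem?_set_ne h]

theorem pvMatGet_set_self (m : List (List Int)) (i j v : Int) (hi : i.toNat < m.length)
    (hj : j.toNat < (m.getD i.toNat []).length) : pvMatGet (pvMatSet m i j v) i j = v := by
  unfold pvMatGet pvMatSet
  rw [pvGetD_set_self [] m i.toNat _ hi]
  exact pvGetD_set_self 0 _ j.toNat v hj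

theorem pvMatGet_set_ne (m : List (List Int)) (i j i' j' v : Int)
    (h : i.toNat ≠ i'.toNat ∨ j.toNat ≠ j'.toNat) :
    pvMatGet (pvMatSet m i j v) i' j' = pvMatGet m i' j' := by
  unfold pvMatGet pvMatSet
  by_cases hii : i.toNat = i'.toNat
  · have hj : j.toNat ≠ j'.toNat := by tauto
    rw [← hii]
    by_cases hi : i.toNat < m.length
    · rw [pvGetD_set_self [] m i.toNat _ hi]
      exact pvGetD_set_ne 0 _ j.toNat j'.toNat v hj
    · rw [List.set_eq_of_length_le (by omega)]
  · rw [pvGetD_set_ne [] m i.toNat i'.toNat _ hii]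

theorem pvRowLen (n : Int) (m : List (List Int))
    (h : ∀ row ∈ m, row.length = (n + 2).toNat) (i : Nat) (hi : i < m.length) :
    (m.getD i []).length = (n + 2).toNat := by
  rw [List.getD_eq_getElem?_getD, List.getElem?_eq_getElem hi]
  exact h _ (List.getElem_mem hi)

-- shape of the storage matrix
def pvShape (n : Int) (m : List (List Int)) : Prop :=
  m.length = (n + 2).toNat ∧ ∀ row ∈ m, row.length = (n + 2).toNat

theorem pvShape_set (n : Int) (m : List (List Int)) (i j v : Int) (hs : pvShape n m)
    (hi : i.toNat < m.length) : pvShape n (pvMatSet m i j v) := by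
  constructor
  · simpa [pvMatSet] using hs.1
  · intro row hrow
    unfold pvMatSet at hrow
    rcases List.mem_or_eq_of_mem_set hrow with hr | hr
    · exact hs.2 row hr
    · subst hr
      rw [List.length_set]
      exact pvRowLen n m hs.2 _ hi

theorem pvMatGet_replicate (r c : Nat) (i j : Int) :
    pvMatGet (List.replicate r (List.replicate c (0 : Int))) i j = 0 := by
  unfold pvMatGet
  have h1 : (List.replicate r (List.replicate c (0 : Int))).getD i.toNat []
      = List.replicate c 0 ∨
      (List.replicate r (List.replicate c (0 : Int))).getD i.toNat [] = [] := by
    by_cases hi : i.toNat < r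
    · left; simp [List.getD_eq_getElem?_getD, hi]
    · right; simp [List.getD_eq_getElem?_getD, hi]
  rcases h1 with h | h <;> rw [h]
  · by_cases hj : j.toNat < c <;>
      simp [List.getD_eq_getElem?_getD, hj]
  · simp [List.getD_eq_getElem?_getD]

-- the intended content of the storage matrix: diagonal base entries, plus pvSol for every
-- interval already processed (all sizes < k, and size k for starts ≤ t)
def pvF (seq : List Int) (C : List (List Int)) (n k t i j : Int) : Int :=
  if 1 ≤ i ∧ i ≤ n + 1 ∧ j = i - 1 then 1
  else if 1 ≤ i ∧ i ≤ j ∧ j ≤ n ∧ (j - i + 1 < k ∨ (j - i + 1 = k ∧ i ≤ t)) then pvSol seq C i j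
  else 0

def pvP (seq : List Int) (C : List (List Int)) (n k t : Int) (m : List (List Int)) : Prop :=
  pvShape n m ∧ ∀ i j : Int, 0 ≤ i → 0 ≤ j → pvMatGet m i j = pvF seq C n k t i j

theorem pvF_left (seq : List Int) (C : List (List Int)) (n k t s e mid : Int)
    (h1 : 1 ≤ s) (h2 : s ≤ mid) (h3 : mid ≤ e) (h4 : e ≤ n) (h5 : e - s + 1 = k) :
    pvF seq C n k t s (mid - 1) = pvSol seq C s (mid - 1) := by
  rcases eq_or_lt_of_le h2 with rfl | hlt
  · unfold pvF
    rw [if_pos ⟨h1, by omega, rfl⟩]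
    exact (pvSol_base seq C s (s - 1) (by omega)).symm
  · unfold pvF
    rw [if_neg (by omega), if_pos ⟨h1, by omega, by omega, Or.inl (by omega)⟩]

theorem pvF_right (seq : List Int) (C : List (List Int)) (n k t s e mid : Int)
    (h1 : 1 ≤ s) (h2 : s ≤ mid) (h3 : mid ≤ e) (h4 : e ≤ n) (h5 : e - s + 1 = k) :
    pvF seq C n k t (mid + 1) e = pvSol seq C (mid + 1) e := by
  rcases eq_or_lt_of_le h3 with rfl | hlt
  · unfold pvF
    rw [if_pos ⟨by omega, by omega, by omega⟩]
    exact (pvSol_base seq C (mid + 1) mid (by omega)).symm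
  · unfold pvF
    rw [if_neg (by omega), if_pos ⟨by omega, by omega, h4, Or.inl (by omega)⟩]

-- A's Python-guard form versus the positive form
theorem pvGuard {α : Type} (v r : Int) (x y : α) :
    (if v ≠ -1 ∧ v ≠ r then x else y) = (if v = -1 ∨ v = r then y else x) := by
  by_cases h : v = -1 ∨ v = r
  · rw [if_pos h, if_neg (by tauto)]
  · rw [if_neg h, if_pos (by tauto)]

-- A's innermost (middle) loop computes pvSol of the current interval
theorem pvInner_eq (seq : List Int) (C : List (List Int)) (n : Int) (m : List (List Int))
    (k s : Int) (h1 : 1 ≤ k) (h2 : 1 ≤ s) (h3 : s + k - 1 ≤ n)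
    (hP : pvP seq C n k (s - 1) m) :
    (PySem.List.pyRange s (s + k - 1 + 1) 1).foldl (fun acc proposed_middle =>
      if (PySem.List.pyGet? seq proposed_middle).getD 0 ≠ -1 ∧
          (PySem.List.pyGet? seq proposed_middle).getD 0
            ≠ ((if proposed_middle > s then 1 else 0)
                + (if proposed_middle < s + k - 1 then 1 else 0)) then acc
      else
        PySem.Int.mod (acc + PySem.Int.mod (PySem.Int.mod
          (pvMatGet C ((proposed_middle - s) + (s + k - 1 - proposed_middle))
              (proposed_middle - s)
            * pvMatGet m s (proposed_middle - 1)) constant_modulo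
          * pvMatGet m (proposed_middle + 1) (s + k - 1)) constant_modulo) constant_modulo) 0
    = pvSol seq C s (s + k - 1) := by
  rw [pvSol_eq, if_neg (by omega)]
  refine PySem.List.foldl_congr_mem _ _ _ _ ?_
  intro acc mid hmem
  rw [PySem.List.mem_pyRange_one] at hmem
  obtain ⟨hm1, hm2⟩ := hmem
  have hl : pvMatGet m s (mid - 1) = pvSol seq C s (mid - 1) := by
    rw [hP.2 s (mid - 1) (by omega) (by omega)]
    exact pvF_left seq C n k (s - 1) s (s + k - 1) mid h2 hm1 (by omega) h3 (by omega)
  have hr : pvMatGet m (mid + 1) (s + k - 1) = pvSol seq C (mid + 1) (s + k - 1) := by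
    rw [hP.2 (mid + 1) (s + k - 1) (by omega) (by omega)]
    exact pvF_right seq C n k (s - 1) s (s + k - 1) mid h2 hm1 (by omega) h3 (by omega)
  simp only [pvStep]
  rw [hl, hr, pvGuard]

-- writing the freshly computed interval value keeps the matrix description, advancing t to s
theorem pvStep_write (seq : List Int) (C : List (List Int)) (n : Int) (m : List (List Int))
    (k s : Int) (h1 : 1 ≤ k) (h2 : 1 ≤ s) (h3 : s + k - 1 ≤ n)
    (hP : pvP seq C n k (s - 1) m) :
    pvP seq C n k s (pvMatSet m s (s + k - 1) (pvSol seq C s (s + k - 1))) := by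
  have hi : s.toNat < m.length := by rw [hP.1.1]; omega
  have hrow : (m.getD s.toNat []).length = (n + 2).toNat := pvRowLen n m hP.1.2 _ hi
  constructor
  · exact pvShape_set n m s (s + k - 1) _ hP.1 hi
  · intro i j hi0 hj0
    by_cases hij : i = s ∧ j = s + k - 1
    · rcases hij with ⟨rfl, rfl⟩
      rw [pvMatGet_set_self m i (i + k - 1) _ hi (by rw [hrow]; omega)]
      unfold pvF
      rw [if_neg (by omega), if_pos ⟨h2, by omega, h3, Or.inr ⟨by omega, le_rfl⟩⟩]
    · rw [pvMatGet_set_ne m s (s + k - 1) i j _ (by omega)]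
      rw [hP.2 i j hi0 hj0]
      unfold pvF
      split_ifs <;> first | rfl | omega

-- the whole of A's loop nest (over an arbitrary combination table C and any n ≥ 0)
theorem pvA_core (seq : List Int) (C : List (List Int)) (n : Int) (hn : 0 ≤ n) :
    pvMatGet ((PySem.List.pyRange 1 (n + 1) 1).foldl (fun m current_interval_size =>
      (PySem.List.pyRange 1 (n - current_interval_size + 2) 1).foldl (fun m current_start =>
        pvMatSet m current_start (current_start + current_interval_size - 1)
          ((PySem.List.pyRange current_start (current_start + current_interval_size - 1 + 1) 1).foldl
            (fun acc proposed_middle =>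
              if (PySem.List.pyGet? seq proposed_middle).getD 0 ≠ -1 ∧
                  (PySem.List.pyGet? seq proposed_middle).getD 0
                    ≠ ((if proposed_middle > current_start then 1 else 0)
                        + (if proposed_middle < current_start + current_interval_size - 1 then 1 else 0)) then acc
              else
                PySem.Int.mod (acc + PySem.Int.mod (PySem.Int.mod
                  (pvMatGet C ((proposed_middle - current_start)
                      + (current_start + current_interval_size - 1 - proposed_middle))
                      (proposed_middle - current_start)
                    * pvMatGet m current_start (proposed_middle - 1)) constant_modulo
                  * pvMatGet m (proposed_middle + 1) (current_start + current_interval_size - 1))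
                  constant_modulo) constant_modulo) 0)) m)
      ((PySem.List.pyRange 1 (n + 2) 1).foldl (fun m initial_index =>
        pvMatSet m initial_index (initial_index - 1) 1)
        (List.replicate (n + 2).toNat (List.replicate (n + 2).toNat 0)))) 1 n
    = pvSol seq C 1 n := by
  -- the diagonal initialisation
  have Hinit : pvP seq C n 1 0
      ((PySem.List.pyRange 1 (n + 2) 1).foldl (fun m initial_index =>
        pvMatSet m initial_index (initial_index - 1) 1)
        (List.replicate (n + 2).toNat (List.replicate (n + 2).toNat 0))) := by
    have H := pvFoldInv (fun m initial_index => pvMatSet m initial_index (initial_index - 1) 1)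
      (fun i m => pvShape n m ∧ ∀ i' j : Int, 0 ≤ i' → 0 ≤ j →
        pvMatGet m i' j = if 1 ≤ i' ∧ i' < i ∧ j = i' - 1 then 1 else 0)
      (n + 2) (n + 2 - 1).toNat 1
      (List.replicate (n + 2).toNat (List.replicate (n + 2).toNat 0)) rfl (by omega)
      ⟨⟨by simp, fun row hrow => by rw [List.eq_of_mem_replicate hrow]; simp⟩,
        fun i' j h1 h2 => by rw [pvMatGet_replicate, if_neg (by omega)]⟩
      ?_
    · refine ⟨H.1, fun i j h1 h2 => ?_⟩
      rw [H.2 i j h1 h2]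
      unfold pvF
      split_ifs <;> first | rfl | omega
    · intro i m hi1 hi2 hQ
      dsimp only
      have hilen : i.toNat < m.length := by rw [hQ.1.1]; omega
      have hrow : (m.getD i.toNat []).length = (n + 2).toNat := pvRowLen n m hQ.1.2 _ hilen
      refine ⟨pvShape_set n m i (i - 1) 1 hQ.1 hilen, fun i' j h1 h2 => ?_⟩
      by_cases hij : i' = i ∧ j = i - 1
      · rcases hij with ⟨rfl, rfl⟩
        rw [pvMatGet_set_self m i' (i' - 1) 1 hilen (by rw [hrow]; omega)]
        rw [if_pos ⟨by omega, by omega, rfl⟩]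
      · rw [pvMatGet_set_ne m i (i - 1) i' j 1 (by omega)]
        rw [hQ.2 i' j h1 h2]
        split_ifs <;> first | rfl | omega
  -- the size loop
  have Houter : pvP seq C n (n + 1) 0
      ((PySem.List.pyRange 1 (n + 1) 1).foldl (fun m current_interval_size =>
        (PySem.List.pyRange 1 (n - current_interval_size + 2) 1).foldl (fun m current_start =>
          pvMatSet m current_start (current_start + current_interval_size - 1)
            ((PySem.List.pyRange current_start (current_start + current_interval_size - 1 + 1) 1).foldl
              (fun acc proposed_middle =>
                if (PySem.List.pyGet? seq proposed_middle).getD 0 ≠ -1 ∧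
                    (PySem.List.pyGet? seq proposed_middle).getD 0
                      ≠ ((if proposed_middle > current_start then 1 else 0)
                          + (if proposed_middle < current_start + current_interval_size - 1 then 1 else 0)) then acc
                else
                  PySem.Int.mod (acc + PySem.Int.mod (PySem.Int.mod
                    (pvMatGet C ((proposed_middle - current_start)
                        + (current_start + current_interval_size - 1 - proposed_middle))
                        (proposed_middle - current_start)
                      * pvMatGet m current_start (proposed_middle - 1)) constant_modulo
                    * pvMatGet m (proposed_middle + 1) (current_start + current_interval_size - 1))
                    constant_modulo) constant_modulo) 0)) m)
        ((PySem.List.pyRange 1 (n + 2) 1).foldl (fun m initial_index =>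
          pvMatSet m initial_index (initial_index - 1) 1)
          (List.replicate (n + 2).toNat (List.replicate (n + 2).toNat 0)))) := by
    refine pvFoldInv _ (fun k m => pvP seq C n k 0 m) (n + 1) (n + 1 - 1).toNat 1 _ rfl
      (by omega) Hinit ?_
    intro k m hk1 hk2 hQ
    dsimp only
    -- the start loop at size k
    have Hin := pvFoldInv (fun m current_start =>
        pvMatSet m current_start (current_start + k - 1)
          ((PySem.List.pyRange current_start (current_start + k - 1 + 1) 1).foldl
            (fun acc proposed_middle =>
              if (PySem.List.pyGet? seq proposed_middle).getD 0 ≠ -1 ∧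
                  (PySem.List.pyGet? seq proposed_middle).getD 0
                    ≠ ((if proposed_middle > current_start then 1 else 0)
                        + (if proposed_middle < current_start + k - 1 then 1 else 0)) then acc
              else
                PySem.Int.mod (acc + PySem.Int.mod (PySem.Int.mod
                  (pvMatGet C ((proposed_middle - current_start)
                      + (current_start + k - 1 - proposed_middle))
                      (proposed_middle - current_start)
                    * pvMatGet m current_start (proposed_middle - 1)) constant_modulo
                  * pvMatGet m (proposed_middle + 1) (current_start + k - 1))
                  constant_modulo) constant_modulo) 0))
      (fun s m => pvP seq C n k (s - 1) m) (n - k + 2) (n - k + 2 - 1).toNat 1 m rfl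
      (by omega)
      (by show pvP seq C n k (1 - 1) m; rw [show (1 : Int) - 1 = 0 from by norm_num]; exact hQ) ?_
    · refine ⟨Hin.1, fun i j h1 h2 => ?_⟩
      rw [Hin.2 i j h1 h2]
      unfold pvF
      split_ifs <;> first | rfl | omega
    · intro s m' hs1 hs2 hQ'
      dsimp only
      have hinner := pvInner_eq seq C n m' k s (by omega) hs1 (by omega) hQ'
      rw [hinner, show s + 1 - 1 = s from by omega]
      exact pvStep_write seq C n m' k s (by omega) hs1 (by omega) hQ'
  rw [Houter.2 1 n (by omega) hn]
  unfold pvF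
  by_cases h0 : n = 0
  · subst h0
    rw [if_pos ⟨le_rfl, by omega, by norm_num⟩]
    exact (pvSol_base seq C 1 0 (by omega)).symm
  · rw [if_neg (by omega), if_pos ⟨le_rfl, by omega, le_rfl, Or.inl (by omega)⟩]

theorem pvA_eq_sol (seq : List Int) (h : seq ≠ []) :
    calculate_total_permutation_variants seq
      = pvSol seq (generate_combinatorial_table ((seq.length : Int) - 1) constant_modulo) 1
          ((seq.length : Int) - 1) := by
  have hlen : seq.length ≠ 0 := by simpa using h
  exact pvA_core seq (generate_combinatorial_table ((seq.length : Int) - 1) constant_modulo)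
    ((seq.length : Int) - 1) (by omega)

-- ===== B SIDE =====

def pvInv (seq : List Int) (C : List (List Int)) (memo : PySem.Dict (Int × Int) Int) : Prop :=
  ∀ p v, memo.get? p = some v → v = pvSol seq C p.1 p.2

theorem pvFoldB (seq : List Int) (C : List (List Int)) (s e : Int) (k : Nat)
    (hse : s ≤ e) (hk : pvSz s e ≤ k)
    (IH : ∀ (s' e' : Int) memo, pvSz s' e' < k → pvInv seq C memo →
      (pvSolveB seq C k s' e' memo).1 = pvSol seq C s' e'
        ∧ pvInv seq C (pvSolveB seq C k s' e' memo).2) :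
    ∀ (L : List Int), (∀ mid ∈ L, s ≤ mid ∧ mid ≤ e) →
      ∀ (acc : Int) (memo : PySem.Dict (Int × Int) Int), pvInv seq C memo →
      (L.foldl (fun (p : Int × PySem.Dict (Int × Int) Int) mid =>
        if (PySem.List.pyGet? seq mid).getD 0 = -1 ∨
            (PySem.List.pyGet? seq mid).getD 0
              = ((if mid > s then 1 else 0) + (if mid < e then 1 else 0)) then
          (PySem.Int.mod (p.1 + PySem.Int.mod (PySem.Int.mod
            (pvMatGet C ((mid - s) + (e - mid)) (mid - s)
              * (pvSolveB seq C k s (mid - 1) p.2).1) constant_modulo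
            * (pvSolveB seq C k (mid + 1) e (pvSolveB seq C k s (mid - 1) p.2).2).1)
            constant_modulo) constant_modulo,
           (pvSolveB seq C k (mid + 1) e (pvSolveB seq C k s (mid - 1) p.2).2).2)
        else p) (acc, memo)).1 = L.foldl (pvStep seq C s e) acc
      ∧ pvInv seq C (L.foldl (fun (p : Int × PySem.Dict (Int × Int) Int) mid =>
        if (PySem.List.pyGet? seq mid).getD 0 = -1 ∨
            (PySem.List.pyGet? seq mid).getD 0
              = ((if mid > s then 1 else 0) + (if mid < e then 1 else 0)) then
          (PySem.Int.mod (p.1 + PySem.Int.mod (PySem.Int.mod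
            (pvMatGet C ((mid - s) + (e - mid)) (mid - s)
              * (pvSolveB seq C k s (mid - 1) p.2).1) constant_modulo
            * (pvSolveB seq C k (mid + 1) e (pvSolveB seq C k s (mid - 1) p.2).2).1)
            constant_modulo) constant_modulo,
           (pvSolveB seq C k (mid + 1) e (pvSolveB seq C k s (mid - 1) p.2).2).2)
        else p) (acc, memo)).2 := by
  intro L
  induction L with
  | nil => exact fun _ acc memo hm => ⟨rfl, hm⟩
  | cons mid L ihL =>
    intro hmem acc memo hmemo
    have hmid := hmem mid (List.mem_cons_self ..)
    simp only [List.foldl_cons]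
    by_cases hg : (PySem.List.pyGet? seq mid).getD 0 = -1 ∨
        (PySem.List.pyGet? seq mid).getD 0
          = ((if mid > s then 1 else 0) + (if mid < e then 1 else 0))
    · have h1 := IH s (mid - 1) memo (by unfold pvSz at hk ⊢; omega) hmemo
      have h2 := IH (mid + 1) e (pvSolveB seq C k s (mid - 1) memo).2
        (by unfold pvSz at hk ⊢; omega) h1.2
      simp only [pvStep, if_pos hg, h1.1, h2.1]
      exact ihL (fun x hx => hmem x (List.mem_cons_of_mem _ hx)) _ _ h2.2
    · simp only [pvStep, if_neg hg]
      exact ihL (fun x hx => hmem x (List.mem_cons_of_mem _ hx)) acc memo hmemo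

theorem pvSolveB_spec (seq : List Int) (C : List (List Int)) :
    ∀ (f : Nat) (s e : Int) (memo : PySem.Dict (Int × Int) Int),
      pvSz s e < f → pvInv seq C memo →
      (pvSolveB seq C f s e memo).1 = pvSol seq C s e
        ∧ pvInv seq C (pvSolveB seq C f s e memo).2 := by
  intro f
  induction f using Nat.strong_induction_on with
  | _ f ih =>
    intro s e memo hf hmemo
    rcases f with _ | k
    · exact absurd hf (by omega)
    · by_cases hse : s > e
      · simp only [pvSolveB, if_pos hse]
        exact ⟨(pvSol_base seq C s e hse).symm, hmemo⟩
      · cases hmem : memo.get? (s, e) with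
        | some v =>
          simp only [pvSolveB, if_neg hse, hmem]
          exact ⟨hmemo (s, e) v hmem, hmemo⟩
        | none =>
          have hF := pvFoldB seq C s e k (by omega) (by unfold pvSz at hf ⊢; omega)
            (fun s' e' memo' hh1 hh2 => ih k (by omega) s' e' memo' hh1 hh2)
            (PySem.List.pyRange s (e + 1) 1)
            (fun mid hm => by rw [PySem.List.mem_pyRange_one] at hm; omega)
            0 memo hmemo
          simp only [pvSolveB, if_neg hse, hmem]
          constructor
          · exact hF.1.trans (by rw [pvSol_eq, if_neg hse])
          · intro p v hp
            rcases eq_or_ne p (s, e) with rfl | hne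
            · rw [PySem.Dict.get?_insert_self] at hp
              have hv := Option.some.inj hp
              dsimp only
              rw [← hv, hF.1, pvSol_eq, if_neg hse]
            · rw [PySem.Dict.get?_insert_of_ne _ _ hne] at hp
              exact hF.2 p v hp

theorem pvB_eq_sol (seq : List Int) :
    calculate_total_permutation_variants_alt seq
      = pvSol seq (generate_combinatorial_table ((seq.length : Int) - 1) constant_modulo) 1
          ((seq.length : Int) - 1) := by
  have hemp : pvInv seq (generate_combinatorial_table ((seq.length : Int) - 1) constant_modulo)
      PySem.Dict.empty := fun p v hp => by
    rw [PySem.Dict.get?_empty] at hp; cases hp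
  exact (pvSolveB_spec seq _ (seq.length + 1) 1 ((seq.length : Int) - 1) PySem.Dict.empty
    (by unfold pvSz; omega) hemp).1

-- ===== VERDICT (by name: the statement is the Claim_ definition above) =====
theorem calculate_total_permutation_variants_spec : Claim_equal_calculate_total_permutation_variants := by
  intro seq _ hpre
  unfold Spec_calculate_total_permutation_variants
  rw [pvA_eq_sol seq hpre, pvB_eq_sol seq]
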